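-- pv_equiv track=rewrite | github.com/Aramis2424/VK_bot | bot_parser/str_parser.py | clean_all_tag_from_str
-- ===== SOURCE A (Python) =====
-- def clean_all_tag_from_str(string_line):
--
--     """
--     Очистка строки stringLine от тэгов и их содержимых
--     :param string_line: Очищаемая строка
--     :return: очищенная строка
--     """
--
--     result = ""
--     not_skip = True
--     for i in list(string_line):
--         if not_skip:
--             if i == "<":
--                 not_skip = False
--             else:
--                 result += i
--         else:
--             if i == ">":
--                 not_skip = True
--     return result
-- ===== SOURCE B (Python) =====
-- def clean_all_tag_from_str(string_line):
--     """Remove tags and their contents: jump over tag regions with str.find instead of a per-character state machine."""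
--     parts = []
--     i = 0
--     while True:
--         j = string_line.find("<", i)
--         if j == -1:
--             parts.append(string_line[i:])
--             break
--         parts.append(string_line[i:j])
--         k = string_line.find(">", j + 1)
--         if k == -1:
--             break
--         i = k + 1
--     return "".join(parts)
-- ===== Notes on version B (the rewrite author's own statement) =====
-- stated objective: faster
-- what changed: Replaces the per-character boolean state machine with a two-pointer loop that jumps over each tag region using str.find and slices the kept segments.
import Mathlib
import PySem

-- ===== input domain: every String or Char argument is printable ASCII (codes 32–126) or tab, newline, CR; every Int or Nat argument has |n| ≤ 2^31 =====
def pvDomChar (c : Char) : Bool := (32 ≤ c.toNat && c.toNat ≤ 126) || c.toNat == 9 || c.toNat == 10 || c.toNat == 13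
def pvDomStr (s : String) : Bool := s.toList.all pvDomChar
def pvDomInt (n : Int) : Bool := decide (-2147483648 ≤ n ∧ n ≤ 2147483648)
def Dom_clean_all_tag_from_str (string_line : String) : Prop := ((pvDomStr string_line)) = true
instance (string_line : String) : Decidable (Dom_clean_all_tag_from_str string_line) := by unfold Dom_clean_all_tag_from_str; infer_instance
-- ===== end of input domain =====

-- B replaces A's per-character boolean state machine by a two-pointer loop that jumps over whole tag regions with find-and-slice (constant-factor faster: C-level find/slice instead of a Python per-character loop).

-- ===== PORT A =====
-- A's loop: state = (result so far, not_skip flag), one step per character, branches in source order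
def pvALoop : List Char → List Char → Bool → List Char
  | [], res, _ => res
  | c :: cs, res, notSkip =>
    if notSkip then
      if c = '<' then pvALoop cs res false
      else pvALoop cs (res ++ [c]) true
    else
      if c = '>' then pvALoop cs res true
      else pvALoop cs res false

def clean_all_tag_from_str (string_line : String) : String :=
  String.ofList (pvALoop string_line.toList [] true)

-- ===== PORT B =====
-- B's loop on List Char: find('<') = takeWhile/dropWhile split; find('>', j+1) = dropWhile on the tail;
-- -1 from find corresponds to the dropWhile result being []; i = k+1 is the .tail of that result.
def pvBLoop (l : List Char) : List Char :=
  if l.dropWhile (· ≠ '<') = [] then l.takeWhile (· ≠ '<')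
  else if ((l.dropWhile (· ≠ '<')).tail.dropWhile (· ≠ '>')) = [] then l.takeWhile (· ≠ '<')
  else l.takeWhile (· ≠ '<') ++ pvBLoop ((l.dropWhile (· ≠ '<')).tail.dropWhile (· ≠ '>')).tail
termination_by l.length
decreasing_by
  rename_i hr hr2
  have h1 : (l.dropWhile (· ≠ '<')).length ≤ l.length := List.length_dropWhile_le _ _
  have h3 : ((l.dropWhile (· ≠ '<')).tail.dropWhile (· ≠ '>')).length ≤ (l.dropWhile (· ≠ '<')).tail.length := List.length_dropWhile_le _ _
  have h4 : (l.dropWhile (· ≠ '<')).tail.length = (l.dropWhile (· ≠ '<')).length - 1 := List.length_tail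
  have h5 : ((l.dropWhile (· ≠ '<')).tail.dropWhile (· ≠ '>')).tail.length = ((l.dropWhile (· ≠ '<')).tail.dropWhile (· ≠ '>')).length - 1 := List.length_tail
  have h6 : 0 < (l.dropWhile (· ≠ '<')).length := List.length_pos_iff.mpr hr
  have h7 : 0 < ((l.dropWhile (· ≠ '<')).tail.dropWhile (· ≠ '>')).length := List.length_pos_iff.mpr hr2
  omega

def clean_all_tag_from_str_alt (string_line : String) : String :=
  String.ofList (pvBLoop string_line.toList)

-- ===== PRECONDITION & SPEC =====
def Spec_clean_all_tag_from_str (string_line : String) (out : String) : Prop := out = clean_all_tag_from_str_alt string_line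
instance (string_line : String) (out : String) : Decidable (Spec_clean_all_tag_from_str string_line out) := by unfold Spec_clean_all_tag_from_str; infer_instance

-- ===== CLAIM (what is proved, stated in full; the proofs are below) =====
def Claim_equal_clean_all_tag_from_str : Prop := ∀ (string_line : String), Dom_clean_all_tag_from_str string_line → Spec_clean_all_tag_from_str string_line (clean_all_tag_from_str string_line)

-- ===== LEMMAS AND PROOFS =====

-- A in skip mode consumes characters up to and including the next '>'
theorem pvALoop_skip (cs res : List Char) :
    pvALoop cs res false =
      if cs.dropWhile (· ≠ '>') = [] then res
      else pvALoop (cs.dropWhile (· ≠ '>')).tail res true := by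
  induction cs with
  | nil => simp [pvALoop]
  | cons c cs ih =>
    by_cases hc : c = '>'
    · subst hc; simp [pvALoop]
    · simp [pvALoop, hc, ih]

-- B's step on an opening '<': skip through the next '>'
theorem pvBLoop_lt (cs : List Char) :
    pvBLoop ('<' :: cs) =
      (if cs.dropWhile (· ≠ '>') = [] then [] else pvBLoop (cs.dropWhile (· ≠ '>')).tail) := by
  rw [pvBLoop.eq_def]
  simp

-- B's step on an ordinary character: keep it
theorem pvBLoop_cons (c : Char) (cs : List Char) (hc : c ≠ '<') :
    pvBLoop (c :: cs) = c :: pvBLoop cs := by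
  rw [pvBLoop.eq_def]; conv_rhs => rw [pvBLoop.eq_def]
  simp only [List.dropWhile_cons, List.takeWhile_cons, hc, ne_eq, decide_not,
    Bool.not_eq_true', decide_eq_false_iff_not, not_false_iff, if_true]
  split_ifs <;> simp_all

-- main invariant: A's keep-mode loop equals the accumulator followed by B's result
theorem pvALoop_eq_pvBLoop (n : ℕ) : ∀ (l : List Char), l.length ≤ n →
    ∀ res, pvALoop l res true = res ++ pvBLoop l := by
  induction n with
  | zero =>
    intro l hl res
    have : l = [] := List.eq_nil_of_length_eq_zero (Nat.le_zero.mp hl)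
    subst this
    rw [pvBLoop.eq_def]; simp [pvALoop]
  | succ n ih =>
    intro l hl res
    match l with
    | [] => rw [pvBLoop.eq_def]; simp [pvALoop]
    | c :: cs =>
      by_cases hc : c = '<'
      · subst hc
        have hstep : pvALoop ('<' :: cs) res true = pvALoop cs res false := by
          simp [pvALoop]
        rw [hstep, pvALoop_skip, pvBLoop_lt]
        by_cases hd : cs.dropWhile (· ≠ '>') = []
        · rw [if_pos hd, if_pos hd]; simp
        · have hu : (cs.dropWhile (· ≠ '>')).tail.length ≤ n := by
            have h3 : (cs.dropWhile (· ≠ '>')).length ≤ cs.length := List.length_dropWhile_le _ _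
            have h5 : (cs.dropWhile (· ≠ '>')).tail.length = (cs.dropWhile (· ≠ '>')).length - 1 := List.length_tail
            simp at hl; omega
          rw [if_neg hd, if_neg hd, ih _ hu res]
      · have hstep : pvALoop (c :: cs) res true = pvALoop cs (res ++ [c]) true := by
          simp [pvALoop, hc]
        rw [hstep, pvBLoop_cons c cs hc, ih cs (by simp at hl; omega) (res ++ [c])]
        simp

-- ===== VERDICT (by name: the statement is the Claim_ definition above) =====
theorem clean_all_tag_from_str_spec : Claim_equal_clean_all_tag_from_str := by
  intro s _
  unfold Spec_clean_all_tag_from_str clean_all_tag_from_str clean_all_tag_from_str_alt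
  rw [pvALoop_eq_pvBLoop s.toList.length s.toList le_rfl []]
  simp
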